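-- pv_equiv track=rewrite | github.com/achokbju/practice-lab-test-2 | labtest2.py | split_n_splice
-- ===== SOURCE A (Python) =====
-- def split_n_splice(s, sep, glue):
--     """split <s> on <sep> and return a list of the split words separated by <glue>
--
--
--
--     if <sep> is not found in <s>, return [<s>, <glue>]
--
--
--
--     if <s> is empty, return [<glue>]
--
--
--
--     >>> split_n_splice('1-2-3', '-', ' baNAna ')
--
--     ['1', ' baNAna ', '2', ' baNAna ', '3']
--
--
--
--     >>> split_n_splice('1', '-', '...fred...')
--
--     ['1', '...fred...']
--
--
--
--     >>> split_n_splice('', '+', 'NATCH')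
--
--     ['NATCH']
--
--     """
--
--     if len(s) == 0:
--         return [glue]
--     else:
--         # For situations where delimiter is not found, splitted s will still be same size
--         # where "1,2,3".split(".") ==> returns ["1,2,3"] which is length of 1
--         # but "1,2,3".split(",") ==> returns ["1","2", "3"] which is length not of 1
--         splitted_string_s = s.split(sep)
--         if len(splitted_string_s) == 1:
--             return [s, glue]
--         else:
--             # Glue is always -1 of the amount of elements in s, so
--             # n elements of s will have n-1 elements of glue
--             sandwich = []
--             for i in range(len(splitted_string_s)):
--                 sandwich.append(splitted_string_s[i])
--                 if i != len(splitted_string_s) - 1: # If not last element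
--                     sandwich.append(glue)
--
--             return sandwich
-- ===== SOURCE B (Python) =====
-- def split_n_splice(s, sep, glue):
--     if len(s) == 0:
--         return [glue]
--     if len(sep) == 0:
--         raise ValueError("empty separator")
--     if sep not in s:
--         return [s, glue]
--     # scan the string directly with find(), never calling split():
--     # emit each part followed by glue, and the final remainder alone
--     out = []
--     rest = s
--     while True:
--         i = rest.find(sep)
--         if i == -1:
--             out.append(rest)
--             return out
--         out.append(rest[:i])
--         out.append(glue)
--         rest = rest[i + len(sep):]
-- ===== Notes on version B (the rewrite author's own statement) =====
-- stated objective: alternative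
-- what changed: B never calls str.split: it scans the string itself with repeated find()/slicing, emitting each part and the glue as it goes, instead of A's split-into-a-list followed by an index loop with a not-last conditional append.
import Mathlib
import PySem

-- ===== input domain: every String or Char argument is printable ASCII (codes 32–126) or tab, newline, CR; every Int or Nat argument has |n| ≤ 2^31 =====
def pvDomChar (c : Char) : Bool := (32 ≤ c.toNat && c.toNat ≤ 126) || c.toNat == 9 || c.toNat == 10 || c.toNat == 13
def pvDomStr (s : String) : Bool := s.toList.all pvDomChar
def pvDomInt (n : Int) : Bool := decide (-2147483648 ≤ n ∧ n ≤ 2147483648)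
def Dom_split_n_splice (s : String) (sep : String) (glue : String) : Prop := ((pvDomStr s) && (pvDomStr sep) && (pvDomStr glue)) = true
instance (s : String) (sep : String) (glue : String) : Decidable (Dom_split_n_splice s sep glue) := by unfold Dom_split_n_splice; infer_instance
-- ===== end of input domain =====

-- B never calls str.split: it scans the string with repeated find()/slicing, emitting each part and glue as it goes; objective: alternative (same cost, different algorithm).

-- ===== PORT A =====
def split_n_splice (s : String) (sep : String) (glue : String) : List String :=
  if PySem.Str.len s == 0 then [glue]
  else
    match PySem.Str.split? s sep with
    | none => []  -- Python raises ValueError (empty separator) here; excluded by Pre_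
    | some splitted_string_s =>
      if splitted_string_s.length == 1 then [s, glue]
      else
        (PySem.List.pyRange 0 splitted_string_s.length 1).foldl
          (fun sandwich i =>
            let sandwich := sandwich ++ [PySem.List.pyGetD splitted_string_s i ""]
            if i ≠ (splitted_string_s.length : Int) - 1 then sandwich ++ [glue] else sandwich)
          []

-- ===== PORT B =====
-- B's while-True loop: append rest[:i] and glue while sep is found, the final remainder alone.
-- 'hsep : sep ≠ []' mirrors B's explicit ValueError guard on an empty separator (needed for termination).
def pvScan (sep glue : List Char) (hsep : sep ≠ []) (out : List (List Char)) (rest : List Char) : List (List Char) :=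
  if h : PySem.Chars.find rest sep = -1 then out ++ [rest]
  else pvScan sep glue hsep (out ++ [rest.take (PySem.Chars.find rest sep).toNat, glue])
        (rest.drop ((PySem.Chars.find rest sep).toNat + sep.length))
termination_by rest.length
decreasing_by
  have h0 : 0 ≤ PySem.Chars.find rest sep := by
    have := PySem.Chars.neg_one_le_find rest sep
    omega
  have hinf : sep <:+: rest := (PySem.Chars.find_nonneg_iff rest sep).mp h0
  have hlen : sep.length ≤ rest.length := List.IsInfix.length_le hinf
  have hsl : 1 ≤ sep.length := List.length_pos_of_ne_nil hsep
  simp only [List.length_drop]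
  omega

def split_n_splice_alt (s : String) (sep : String) (glue : String) : List String :=
  if PySem.Str.len s == 0 then [glue]
  else if hsep : sep.toList = [] then []  -- B raises ValueError (empty separator) here; excluded by Pre_
  else if PySem.Str.isIn sep s = false then [s, glue]
  else (pvScan sep.toList glue.toList hsep [] s.toList).map String.ofList

-- ===== PRECONDITION & SPEC =====
-- Pre_ excludes only sep = "" with s nonempty, where both A's s.split(sep) and B's explicit guard raise ValueError.
def Pre_split_n_splice (s : String) (sep : String) (glue : String) : Prop := s = "" ∨ sep ≠ ""
instance (s : String) (sep : String) (glue : String) : Decidable (Pre_split_n_splice s sep glue) := by unfold Pre_split_n_splice; infer_instance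
def pvWitness_split_n_splice : String × String × String := ("1-2-3", "-", " baNAna ")

def Spec_split_n_splice (s : String) (sep : String) (glue : String) (out : List String) : Prop := out = split_n_splice_alt s sep glue
instance (s : String) (sep : String) (glue : String) (out : List String) : Decidable (Spec_split_n_splice s sep glue out) := by unfold Spec_split_n_splice; infer_instance

-- ===== CLAIM (what is proved, stated in full; the proofs are below) =====
def Claim_equal_split_n_splice : Prop := ∀ (s : String) (sep : String) (glue : String), Dom_split_n_splice s sep glue → Pre_split_n_splice s sep glue → Spec_split_n_splice s sep glue (split_n_splice s sep glue)

-- ===== LEMMAS AND PROOFS =====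

-- find-based specification scanner: the parts of (pre ++ rest) splitting only inside rest
def pvParts (sep : List Char) (hsep : sep ≠ []) (pre rest : List Char) : List (List Char) :=
  if h : PySem.Chars.find rest sep = -1 then [pre ++ rest]
  else (pre ++ rest.take (PySem.Chars.find rest sep).toNat) ::
    pvParts sep hsep [] (rest.drop ((PySem.Chars.find rest sep).toNat + sep.length))
termination_by rest.length
decreasing_by
  have h0 : 0 ≤ PySem.Chars.find rest sep := by
    have := PySem.Chars.neg_one_le_find rest sep
    omega
  have hinf : sep <:+: rest := (PySem.Chars.find_nonneg_iff rest sep).mp h0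
  have hlen : sep.length ≤ rest.length := List.IsInfix.length_le hinf
  have hsl : 1 ≤ sep.length := List.length_pos_of_ne_nil hsep
  simp only [List.length_drop]
  omega

-- find on [] for a nonempty needle
lemma pv_find_nil (sep : List Char) (hsep : sep ≠ []) : PySem.Chars.find [] sep = -1 := by
  rw [PySem.Chars.find_eq_neg_one_iff]
  intro hinf
  exact hsep (List.eq_nil_of_infix_nil hinf)

-- uniqueness: first occurrence determines find
lemma pv_find_eq (s sep : List Char) (m : Nat) (h1 : sep <+: s.drop m)
    (h2 : ∀ i < m, ¬ sep <+: s.drop i) : PySem.Chars.find s sep = (m : Int) := by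
  have hinf : sep <:+: s := by
    rcases h1 with ⟨t, ht⟩
    exact ⟨s.take m, t, by rw [List.append_assoc, ht, List.take_append_drop]⟩
  have h0 : 0 ≤ PySem.Chars.find s sep := (PySem.Chars.find_nonneg_iff s sep).mpr hinf
  obtain ⟨hpre, hmin⟩ := PySem.Chars.find_spec h0
  have hle1 : (PySem.Chars.find s sep).toNat ≤ m := by
    by_contra hlt
    exact hmin m (by omega) h1
  have hle2 : m ≤ (PySem.Chars.find s sep).toNat := by
    by_contra hlt
    exact h2 _ (by omega) hpre
  omega

-- find at a cons when sep is a prefix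
lemma pv_find_prefix (l sep : List Char) (h : sep <+: l) : PySem.Chars.find l sep = 0 := by
  have := pv_find_eq l sep 0 (by simpa using h) (by intro i hi; omega)
  simpa using this

-- find steps over a non-matching head
lemma pv_find_cons (c : Char) (rest sep : List Char) (h : ¬ sep <+: (c :: rest)) :
    PySem.Chars.find (c :: rest) sep =
      (if PySem.Chars.find rest sep = -1 then -1 else PySem.Chars.find rest sep + 1) := by
  by_cases hr : PySem.Chars.find rest sep = -1
  · rw [if_pos hr, PySem.Chars.find_eq_neg_one_iff]
    intro hinf
    rcases List.infix_cons_iff.mp hinf with hp | hi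
    · exact h hp
    · exact (PySem.Chars.find_eq_neg_one_iff rest sep).mp hr hi
  · rw [if_neg hr]
    have h0 : 0 ≤ PySem.Chars.find rest sep := by
      have := PySem.Chars.neg_one_le_find rest sep
      omega
    obtain ⟨hpre, hmin⟩ := PySem.Chars.find_spec h0
    set k := (PySem.Chars.find rest sep).toNat with hk
    have : PySem.Chars.find (c :: rest) sep = ((k + 1 : Nat) : Int) := by
      apply pv_find_eq
      · simpa using hpre
      · intro i hi
        cases i with
        | zero => simpa using h
        | succ j =>
          have : j < k := by omega
          simpa using hmin j this
    rw [this]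
    omega

-- pvParts absorbs a non-matching head into the prefix accumulator
lemma pvParts_cons (sep : List Char) (hsep : sep ≠ []) (pre : List Char) (c : Char)
    (rest : List Char) (h : ¬ sep <+: (c :: rest)) :
    pvParts sep hsep pre (c :: rest) = pvParts sep hsep (pre ++ [c]) rest := by
  have hf := pv_find_cons c rest sep h
  by_cases hr : PySem.Chars.find rest sep = -1
  · rw [if_pos hr] at hf
    conv_lhs => rw [pvParts]
    conv_rhs => rw [pvParts]
    simp [hf, hr]
  · rw [if_neg hr] at hf
    have h0 : 0 ≤ PySem.Chars.find rest sep := by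
      have := PySem.Chars.neg_one_le_find rest sep
      omega
    have hne : ¬ PySem.Chars.find (c :: rest) sep = -1 := by omega
    conv_lhs => rw [pvParts]
    conv_rhs => rw [pvParts]
    rw [dif_neg hne, dif_neg hr]
    have htn : (PySem.Chars.find (c :: rest) sep).toNat = (PySem.Chars.find rest sep).toNat + 1 := by
      omega
    simp only [htn, List.take_succ_cons, List.append_assoc, List.singleton_append]
    rw [show (PySem.Chars.find rest sep).toNat + 1 + sep.length
        = ((PySem.Chars.find rest sep).toNat + sep.length) + 1 from by omega,
      List.drop_succ_cons]

-- the fuel recursion behind PySem split equals the find-based scanner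
lemma pv_go_eq' (sep : List Char) (hsep : sep ≠ []) (fuel : Nat) :
    ∀ (l cur : List Char) (acc : List (List Char)), l.length < fuel →
      PySem.Chars.splitOn.go sep fuel l cur acc = acc.reverse ++ pvParts sep hsep cur.reverse l := by
  induction fuel with
  | zero => intro l cur acc h; omega
  | succ n ih =>
    intro l cur acc h
    cases l with
    | nil =>
      rw [PySem.Chars.splitOn.go]
      · rw [pvParts]
        simp [pv_find_nil sep hsep]
      · omega
    | cons c rest =>
      rw [PySem.Chars.splitOn.go]
      by_cases hp : sep.isPrefixOf (c :: rest) = true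
      · rw [if_pos hp]
        have hpre : sep <+: (c :: rest) := by
          rwa [List.isPrefixOf_iff_prefix] at hp
        have hlen : sep.length ≤ (c :: rest).length := hpre.length_le
        have hsl : 1 ≤ sep.length := List.length_pos_of_ne_nil hsep
        have hfl : ((c :: rest).drop sep.length).length < n := by
          simp only [List.length_drop]
          simp only [List.length_cons] at h ⊢
          omega
        rw [ih _ _ _ hfl]
        have hf : PySem.Chars.find (c :: rest) sep = 0 := pv_find_prefix _ _ hpre
        conv_rhs => rw [pvParts]
        rw [dif_neg (by rw [hf]; omega)]
        simp [hf]
      · rw [if_neg hp]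
        have hnp : ¬ sep <+: (c :: rest) := by
          rwa [List.isPrefixOf_iff_prefix] at hp
        have hfl : rest.length < n := by
          simp only [List.length_cons] at h
          omega
        rw [ih _ _ _ hfl, pvParts_cons sep hsep _ c rest hnp]
        simp

-- splitOn is the scanner with empty accumulators
lemma pv_splitOn_eq (cs sep : List Char) (hsep : sep ≠ []) :
    PySem.Chars.splitOn cs sep = pvParts sep hsep [] cs := by
  have := pv_go_eq' sep hsep (cs.length + 1) cs [] [] (by omega)
  simpa [PySem.Chars.splitOn] using this

lemma pvParts_ne_nil (sep : List Char) (hsep : sep ≠ []) (pre rest : List Char) :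
    pvParts sep hsep pre rest ≠ [] := by
  rw [pvParts]
  split_ifs <;> simp

-- B's accumulator loop = parts interleaved with glue, last glue dropped
lemma pvScan_eq' (sep glue : List Char) (hsep : sep ≠ []) :
    ∀ (rest : List Char) (out : List (List Char)),
      pvScan sep glue hsep out rest =
        out ++ ((pvParts sep hsep [] rest).flatMap (fun p => [p, glue])).dropLast := by
  intro rest out
  induction out, rest using pvScan.induct sep glue hsep with
  | case1 out rest h =>
    rw [pvScan, pvParts]
    simp [h]
  | case2 out rest h ih =>
    conv_lhs => rw [pvScan]
    rw [dif_neg h]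
    conv_rhs => rw [pvParts]
    rw [dif_neg h]
    rw [ih]
    have hnn := pvParts_ne_nil sep hsep []
        (rest.drop ((PySem.Chars.find rest sep).toNat + sep.length))
    cases hpp : pvParts sep hsep [] (rest.drop ((PySem.Chars.find rest sep).toNat + sep.length)) with
    | nil => exact absurd hpp hnn
    | cons q qs => simp [List.flatMap_cons]

-- index-loop step: below the last index the conditional append is uniform
lemma range_flatMap_take (L : List String) (glue : String) (m : Nat) (hm : m ≤ L.length - 1) :
    (List.range m).flatMap
        (fun (k : Nat) => if (k : Int) ≠ (L.length : Int) - 1 then [L.getD k "", glue] else [L.getD k ""])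
      = (L.take m).flatMap (fun p => [p, glue]) := by
  induction m with
  | zero => simp
  | succ m ih =>
    have hm' : m ≤ L.length - 1 := by omega
    have hmlt : m < L.length := by omega
    have hcond : (m : Int) ≠ (L.length : Int) - 1 := by omega
    rw [List.range_succ, List.flatMap_append, ih hm']
    have htake : L.take (m + 1) = L.take m ++ [L[m]] := by
      rw [List.take_succ]
      simp [List.getElem?_eq_getElem hmlt]
    rw [htake, List.flatMap_append, List.flatMap_singleton]
    simp [hcond, List.getElem?_eq_getElem hmlt]

-- A's indexed conditional flatten = flatten-all then drop the final glue
lemma flatMap_if_eq_dropLast (L : List String) (glue : String) :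
    (List.range L.length).flatMap
        (fun (k : Nat) => if (k : Int) ≠ (L.length : Int) - 1 then [L.getD k "", glue] else [L.getD k ""])
      = (L.flatMap (fun p => [p, glue])).dropLast := by
  rcases eq_or_ne L [] with h | h
  · simp [h]
  · have hn : 1 ≤ L.length := List.length_pos_of_ne_nil h
    have hlast : L.length - 1 < L.length := by omega
    have hL : L = L.take (L.length - 1) ++ [L[L.length - 1]] := by
      conv_lhs => rw [← List.dropLast_append_getLast h]
      rw [List.dropLast_eq_take, List.getLast_eq_getElem]
    have hrange : List.range L.length = List.range (L.length - 1) ++ [L.length - 1] := by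
      conv_lhs => rw [show L.length = (L.length - 1) + 1 by omega, List.range_succ]
    rw [hrange, List.flatMap_append, range_flatMap_take L glue (L.length - 1) le_rfl]
    have hcond : ¬ ((L.length - 1 : Nat) : Int) ≠ (L.length : Int) - 1 := by omega
    conv_rhs => rw [hL]
    simp only [List.flatMap_append, List.flatMap_cons, List.flatMap_nil, List.append_nil,
      if_neg hcond]
    rw [show ((L.take (L.length - 1)).flatMap fun p => [p, glue]) ++ [L[L.length - 1], glue]
        = (((L.take (L.length - 1)).flatMap fun p => [p, glue]) ++ [L[L.length - 1]]) ++ [glue] by simp,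
      List.dropLast_concat]
    simp [List.getElem?_eq_getElem hlast]

-- the same over the Int-valued pyRange A's loop iterates
lemma pyRange_flatMap_if_eq_dropLast (L : List String) (glue : String) :
    (PySem.List.pyRange 0 (L.length : Int) 1).flatMap
        (fun i => if i ≠ (L.length : Int) - 1 then [PySem.List.pyGetD L i "", glue]
                  else [PySem.List.pyGetD L i ""])
      = (L.flatMap (fun p => [p, glue])).dropLast := by
  rw [PySem.List.pyRange_one]
  simp only [sub_zero, Int.toNat_natCast]
  rw [List.flatMap_map]
  simp only [zero_add, PySem.List.pyGetD_natCast]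
  exact flatMap_if_eq_dropLast L glue

-- A's loop equals flatten-then-drop-last-glue
lemma loop_eq_trim (L : List String) (glue : String) :
    (PySem.List.pyRange 0 L.length 1).foldl
        (fun sandwich i =>
          let sandwich := sandwich ++ [PySem.List.pyGetD L i ""]
          if i ≠ (L.length : Int) - 1 then sandwich ++ [glue] else sandwich)
        []
      = (L.flatMap (fun part => [part, glue])).dropLast := by
  have hstep := PySem.List.foldl_congr_mem
    (l := PySem.List.pyRange 0 L.length 1) (init := ([] : List String))
    (f := fun sandwich i =>
      let sandwich := sandwich ++ [PySem.List.pyGetD L i ""]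
      if i ≠ (L.length : Int) - 1 then sandwich ++ [glue] else sandwich)
    (g := fun sandwich i =>
      sandwich ++ (if i ≠ (L.length : Int) - 1 then [PySem.List.pyGetD L i "", glue]
                   else [PySem.List.pyGetD L i ""]))
    (by intro acc x _; by_cases hx : x ≠ (L.length : Int) - 1 <;> simp [hx])
  rw [hstep, PySem.List.foldl_append_eq_flatMap, List.nil_append]
  exact pyRange_flatMap_if_eq_dropLast L glue

-- length-1 split ↔ separator absent
lemma pvParts_singleton_iff (sep : List Char) (hsep : sep ≠ []) (cs : List Char) :
    (pvParts sep hsep [] cs).length = 1 ↔ PySem.Chars.find cs sep = -1 := by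
  rw [pvParts]
  by_cases h : PySem.Chars.find cs sep = -1
  · simp [h]
  · rw [dif_neg h]
    have := pvParts_ne_nil sep hsep [] (cs.drop ((PySem.Chars.find cs sep).toNat + sep.length))
    constructor
    · intro hl
      simp only [List.length_cons] at hl
      exact absurd (List.eq_nil_of_length_eq_zero (by omega)) this
    · intro hf; exact absurd hf h

-- ===== VERDICT (by name: the statement is the Claim_ definition above) =====
theorem split_n_splice_spec : Claim_equal_split_n_splice := by
  intro s sep glue _ _
  unfold Spec_split_n_splice split_n_splice split_n_splice_alt
  by_cases hs : (PySem.Str.len s == 0) = true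
  · rw [if_pos hs, if_pos hs]
  · rw [if_neg hs, if_neg hs]
    by_cases hsep : sep.toList = []
    · rw [dif_pos hsep]
      have : PySem.Str.split? s sep = none := by
        simp [PySem.Str.split?, PySem.Chars.split?, hsep]
      rw [this]
    · rw [dif_neg hsep]
      have hsplit : PySem.Str.split? s sep =
          some ((pvParts sep.toList hsep [] s.toList).map String.ofList) := by
        simp [PySem.Str.split?, PySem.Chars.split?, hsep, pv_splitOn_eq s.toList sep.toList hsep]
      rw [hsplit]
      dsimp only
      by_cases hin : PySem.Str.isIn sep s = false
      · rw [if_pos hin]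
        have hfind : PySem.Chars.find s.toList sep.toList = -1 := by
          rw [PySem.Chars.find_eq_neg_one_iff]
          intro hinf
          have := (PySem.Str.isIn_iff_infix sep s).mpr hinf
          rw [hin] at this
          exact Bool.false_ne_true this
        have hlen1 : (pvParts sep.toList hsep [] s.toList).length = 1 :=
          (pvParts_singleton_iff sep.toList hsep s.toList).mpr hfind
        have : ((pvParts sep.toList hsep [] s.toList).map String.ofList).length == 1 := by
          simp [hlen1]
        rw [if_pos this]
      · rw [if_neg hin]
        have htrue : PySem.Str.isIn sep s = true := by
          cases h : PySem.Str.isIn sep s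
          · exact absurd h hin
          · rfl
        have hfind : PySem.Chars.find s.toList sep.toList ≠ -1 := by
          rw [PySem.Chars.find_ne_neg_one_iff]
          exact (PySem.Str.isIn_iff_infix sep s).mp htrue
        have hlen1 : (pvParts sep.toList hsep [] s.toList).length ≠ 1 := by
          intro h1
          exact hfind ((pvParts_singleton_iff sep.toList hsep s.toList).mp h1)
        have hne : ¬ (((pvParts sep.toList hsep [] s.toList).map String.ofList).length == 1) = true := by
          simp [hlen1]
        rw [if_neg hne]
        rw [loop_eq_trim _ glue, pvScan_eq' sep.toList glue.toList hsep s.toList []]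
        rw [List.nil_append, List.map_dropLast, List.map_flatMap]
        congr 1
        rw [List.flatMap_map]
        congr 1
        funext p
        simp [String.ofList]
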